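-- pv_equiv track=rewrite | github.com/neeljshah/court-vision | src/analytics/momentum.py | scoring_run_length
-- ===== SOURCE A (Python) =====
-- def scoring_run_length(scored_teams: list[str]) -> int:
--     """
--     Length of the current consecutive scoring run by one team.
--
--     Args:
--         scored_teams: Ordered list of team labels that scored on each possession
--                       (e.g. ["A","A","B","A","A","A"]).  Non-scoring possessions
--                       should be omitted or handled upstream.
--
--     Returns:
--         Length of the trailing consecutive run by the same team.
--         0 if the list is empty.
--     """
--     if not scored_teams:
--         return 0
--     current = scored_teams[-1]
--     run = 0
--     for t in reversed(scored_teams):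
--         if t == current:
--             run += 1
--         else:
--             break
--     return run
-- ===== SOURCE B (Python) =====
-- def scoring_run_length(scored_teams: list[str]) -> int:
--     """Two-stage: first materialize the whole run-length encoding of the list as
--     (team, count) pairs, then return the count of the last run (0 if none)."""
--     runs = []
--     for t in scored_teams:
--         if runs and runs[-1][0] == t:
--             runs[-1][1] += 1
--         else:
--             runs.append([t, 1])
--     return runs[-1][1] if runs else 0
-- ===== Notes on version B (the rewrite author's own statement) =====
-- stated objective: alternative
-- what changed: Replaces A's backward scan with early break by a forward pass that builds the full run-length encoding of the list as (team, count) pairs and then returns the count of the last pair.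
import Mathlib
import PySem

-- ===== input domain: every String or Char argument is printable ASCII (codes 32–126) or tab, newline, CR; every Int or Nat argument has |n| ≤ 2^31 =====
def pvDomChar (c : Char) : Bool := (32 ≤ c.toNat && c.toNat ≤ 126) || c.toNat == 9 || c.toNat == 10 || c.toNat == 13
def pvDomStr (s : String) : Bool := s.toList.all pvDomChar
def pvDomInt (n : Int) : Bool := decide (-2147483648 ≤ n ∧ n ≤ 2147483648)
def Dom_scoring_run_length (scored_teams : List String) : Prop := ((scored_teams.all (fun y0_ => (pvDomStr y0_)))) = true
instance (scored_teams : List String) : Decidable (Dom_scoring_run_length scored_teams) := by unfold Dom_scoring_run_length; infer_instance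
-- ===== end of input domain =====

-- B replaces A's backward scan-with-break by a forward pass building the full
-- run-length encoding and returning the last run's count (objective: alternative).


-- ===== PORT A =====
-- 'for t in reversed(scored_teams): if t == current: run += 1 else: break'
def pvLoopA (current : String) (run : Int) : List String → Int
  | [] => run
  | t :: ts => if t == current then pvLoopA current (run + 1) ts else run

def scoring_run_length (scored_teams : List String) : Int :=
  if scored_teams.isEmpty then 0
  else
    -- current = scored_teams[-1]; the list is nonempty here, so headD's default is never used
    let current := scored_teams.reverse.headD ""
    pvLoopA current 0 scored_teams.reverse

-- ===== PORT B =====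
-- 'runs' accumulates the run-length encoding; 'if runs and runs[-1][0] == t: runs[-1][1] += 1
-- else: runs.append([t, 1])'
def pvBuildRuns (runs : List (String × Int)) : List String → List (String × Int)
  | [] => runs
  | t :: ts =>
    match runs.getLast? with
    | some (c, n) =>
        if c == t then pvBuildRuns (runs.dropLast ++ [(c, n + 1)]) ts
        else pvBuildRuns (runs ++ [(t, 1)]) ts
    | none => pvBuildRuns [(t, 1)] ts

-- 'return runs[-1][1] if runs else 0'
def pvLastCount (runs : List (String × Int)) : Int :=
  match runs.getLast? with
  | some (_, n) => n
  | none => 0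

def scoring_run_length_alt (scored_teams : List String) : Int :=
  pvLastCount (pvBuildRuns [] scored_teams)

-- ===== PRECONDITION & SPEC =====
def Spec_scoring_run_length (scored_teams : List String) (out : Int) : Prop := out = scoring_run_length_alt scored_teams
instance (scored_teams : List String) (out : Int) : Decidable (Spec_scoring_run_length scored_teams out) := by unfold Spec_scoring_run_length; infer_instance

-- ===== CLAIM (what is proved, stated in full; the proofs are below) =====
def Claim_equal_scoring_run_length : Prop := ∀ (scored_teams : List String), Dom_scoring_run_length scored_teams → Spec_scoring_run_length scored_teams (scoring_run_length scored_teams)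

-- ===== LEMMAS AND PROOFS =====

-- one step of B's loop when the accumulator ends in the open run (c, n)
theorem pvBuildRuns_cons_last (acc : List (String × Int)) (c : String) (n : Int)
    (t : String) (ts : List String) :
    pvBuildRuns (acc ++ [(c, n)]) (t :: ts) =
      if c == t then pvBuildRuns (acc ++ [(c, n + 1)]) ts
      else pvBuildRuns (acc ++ [(c, n)] ++ [(t, 1)]) ts := by
  have hl : (acc ++ [(c, n)]).getLast? = some (c, n) := by simp
  have hd : (acc ++ [(c, n)]).dropLast = acc := by simp
  conv_lhs => rw [pvBuildRuns]
  simp only [hl, hd]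

-- Only the last element of the accumulator is ever inspected or modified:
-- a prefix in front of the final run passes through untouched.
theorem pvBuildRuns_append (l : List String) : ∀ (acc : List (String × Int)) (c : String) (n : Int),
    pvBuildRuns (acc ++ [(c, n)]) l = acc ++ pvBuildRuns [(c, n)] l := by
  induction l with
  | nil => intro acc c n; simp [pvBuildRuns]
  | cons t ts ih =>
    intro acc c n
    have h0 := pvBuildRuns_cons_last [] c n t ts
    simp only [List.nil_append] at h0
    rw [pvBuildRuns_cons_last, h0]
    by_cases h : (c == t) = true
    · rw [if_pos h, if_pos h, ih]
    · rw [if_neg h, if_neg h, ih (acc ++ [(c, n)]) t 1, ih [(c, n)] t 1]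
      simp

-- B's one-open-run step, with the sealed run pulled out front
theorem pvBuildRuns_one_cons (c : String) (n : Int) (t : String) (ts : List String) :
    pvBuildRuns [(c, n)] (t :: ts) =
      if c == t then pvBuildRuns [(c, n + 1)] ts
      else [(c, n)] ++ pvBuildRuns [(t, 1)] ts := by
  have h0 := pvBuildRuns_cons_last [] c n t ts
  simp only [List.nil_append] at h0
  rw [h0]
  by_cases h : (c == t) = true
  · rw [if_pos h, if_pos h]
  · rw [if_neg h, if_neg h, pvBuildRuns_append]

theorem pvBuildRuns_ne_nil (l : List String) : ∀ (c : String) (n : Int),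
    pvBuildRuns [(c, n)] l ≠ [] := by
  induction l with
  | nil => intro c n; simp [pvBuildRuns]
  | cons t ts ih =>
    intro c n
    rw [pvBuildRuns_one_cons]
    by_cases h : (c == t) = true
    · rw [if_pos h]; exact ih c (n + 1)
    · rw [if_neg h]; simp

-- The last count of B's encoding started from one open run (c, n): if the rest of the
-- list is all c the run extends; otherwise the open run is sealed and the answer is B's.
theorem lastCount_buildRuns (l : List String) : ∀ (c : String) (n : Int),
    pvLastCount (pvBuildRuns [(c, n)] l) =
      if l.all (fun x => x == c) then n + l.length else scoring_run_length_alt l := by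
  induction l with
  | nil => intro c n; simp [pvBuildRuns, pvLastCount]
  | cons t ts ih =>
    intro c n
    rw [pvBuildRuns_one_cons]
    by_cases hct : c = t
    · subst hct
      rw [if_pos (by simp), ih]
      by_cases hall : ts.all (fun x => x == c) = true
      · rw [if_pos hall, if_pos (by simp [hall])]
        simp only [List.length_cons]
        push_cast; ring
      · rw [if_neg hall, if_neg (by simp [hall])]
        show scoring_run_length_alt ts = pvLastCount (pvBuildRuns [] (c :: ts))
        have h0 : pvBuildRuns [] (c :: ts) = pvBuildRuns [(c, 1)] ts := rfl
        rw [h0, ih, if_neg hall]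
    · have hne : (c == t) = false := by simp [hct]
      rw [if_neg (by simp [hne])]
      have hlast : pvLastCount ([(c, n)] ++ pvBuildRuns [(t, 1)] ts) =
          pvLastCount (pvBuildRuns [(t, 1)] ts) := by
        unfold pvLastCount
        rw [List.getLast?_append_of_ne_nil _ (pvBuildRuns_ne_nil ts t 1)]
      have htne : (t == c) = false := by
        simp only [beq_eq_false_iff_ne, ne_eq]
        exact fun h => hct h.symm
      have hall : ((t :: ts).all (fun x => x == c)) = false := by simp [htne]
      rw [hlast, ih, hall]
      simp only [Bool.false_eq_true, if_false]
      show _ = pvLastCount (pvBuildRuns [] (t :: ts))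
      have h0 : pvBuildRuns [] (t :: ts) = pvBuildRuns [(t, 1)] ts := rfl
      rw [h0, ih]

-- unfolding B one step on a cons
theorem alt_cons (t : String) (ts : List String) :
    scoring_run_length_alt (t :: ts) =
      if ts.all (fun x => x == t) then 1 + (ts.length : Int) else scoring_run_length_alt ts := by
  show pvLastCount (pvBuildRuns [] (t :: ts)) = _
  have h0 : pvBuildRuns [] (t :: ts) = pvBuildRuns [(t, 1)] ts := rfl
  rw [h0, lastCount_buildRuns]

-- A's loop over an appended list: if the first part all matches, continue on the second
-- with the accumulated run; otherwise the break happened inside the first part.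
theorem pvLoopA_append (l : List String) : ∀ (c : String) (run : Int) (l' : List String),
    pvLoopA c run (l ++ l') =
      if l.all (fun x => x == c) then pvLoopA c (run + l.length) l' else pvLoopA c run l := by
  induction l with
  | nil => intro c run l'; simp
  | cons t ts ih =>
    intro c run l'
    by_cases htc : t = c
    · subst htc
      have h1 : pvLoopA t run ((t :: ts) ++ l') = pvLoopA t (run + 1) (ts ++ l') := by
        simp [pvLoopA]
      rw [h1, ih t (run + 1) l']
      have h2 : ((t :: ts).all (fun x => x == t)) = ts.all (fun x => x == t) := by simp
      rw [h2]
      by_cases hall : ts.all (fun x => x == t) = true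
      · rw [if_pos hall, if_pos hall]
        congr 1
        push_cast [List.length_cons]; ring
      · rw [if_neg hall, if_neg hall]
        simp [pvLoopA]
    · have hne : (t == c) = false := by simp [htc]
      simp [pvLoopA, hne]

-- A's loop on an all-equal list returns run + length
theorem pvLoopA_all (l : List String) : ∀ (c : String) (run : Int),
    l.all (fun x => x == c) = true → pvLoopA c run l = run + l.length := by
  induction l with
  | nil => intro c run _; simp [pvLoopA]
  | cons t ts ih =>
    intro c run h
    simp only [List.all_cons, Bool.and_eq_true, beq_iff_eq] at h
    obtain ⟨rfl, hts⟩ := h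
    simp only [pvLoopA, beq_self_eq_true]
    rw [ih t (run + 1) (by simpa using hts)]
    simp only [List.length_cons]
    push_cast; ring

theorem main_eq (xs : List String) : scoring_run_length xs = scoring_run_length_alt xs := by
  induction xs with
  | nil => rfl
  | cons t ts ih =>
    rw [alt_cons, ← ih]
    by_cases hall : ts.all (fun x => x == t) = true
    · -- whole list is t's: A returns 1 + |ts|
      rw [if_pos hall]
      have hrev : (ts.reverse).all (fun x => x == t) = true := by simpa using hall
      show (if (t :: ts).isEmpty then (0 : Int)
        else pvLoopA ((t :: ts).reverse.headD "") 0 (t :: ts).reverse) = 1 + ts.length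
      simp only [List.isEmpty_cons, Bool.false_eq_true, if_false, List.reverse_cons]
      have hhead : (ts.reverse ++ [t]).headD "" = t := by
        cases h : ts.reverse with
        | nil => rfl
        | cons a l =>
          have ha : a = t := by
            have : a ∈ ts.reverse := by rw [h]; exact List.mem_cons_self
            have := List.all_eq_true.mp hrev a this
            simpa using this
          simp [ha]
      rw [hhead]
      rw [pvLoopA_all (ts.reverse ++ [t]) t 0 (by simp [hrev])]
      simp; ring
    · -- break happens within ts: A (t :: ts) = A ts
      rw [if_neg hall]
      have hts : ts ≠ [] := by rintro rfl; simp at hall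
      have hrevne : ts.reverse ≠ [] := by simpa using hts
      have hrevall : (ts.reverse).all (fun x => x == (ts.reverse.headD "")) = false ∨
          (ts.reverse).all (fun x => x == (ts.reverse.headD "")) = true := by
        cases h : (ts.reverse).all (fun x => x == (ts.reverse.headD "")) <;> simp
      show (if (t :: ts).isEmpty then (0 : Int)
        else pvLoopA ((t :: ts).reverse.headD "") 0 (t :: ts).reverse) =
        (if ts.isEmpty then (0 : Int) else pvLoopA (ts.reverse.headD "") 0 ts.reverse)
      simp only [List.isEmpty_cons, Bool.false_eq_true, if_false, List.reverse_cons]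
      rw [List.isEmpty_eq_false_iff_exists_mem.mpr
        (by cases ts with | nil => exact absurd rfl hts | cons a l => exact ⟨a, List.mem_cons_self⟩)]
      simp only [Bool.false_eq_true, if_false]
      set c := ts.reverse.headD "" with hc
      have hhead : (ts.reverse ++ [t]).headD "" = c := by
        cases h : ts.reverse with
        | nil => exact absurd h hrevne
        | cons a l => simp [h, hc]
      rw [hhead, pvLoopA_append ts.reverse c 0 [t]]
      rcases hrevall with hF | hT
      · rw [if_neg (by simp [hF])]
      · -- ts is constant c, and c ≠ t (else hall); A on both sides returns |ts|
        have hcne : ¬ (t = c) := by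
          intro h
          apply hall
          have hc' : ts.all (fun x => x == c) = true := by
            rw [← List.all_reverse]; exact hT
          rw [h]; exact hc'
        rw [if_pos hT]
        have : pvLoopA c (0 + (ts.reverse).length) [t] = 0 + (ts.reverse).length := by
          simp only [pvLoopA]
          rw [if_neg (by simp [hcne])]
        rw [this, pvLoopA_all ts.reverse c _ hT]

-- ===== VERDICT (by name: the statement is the Claim_ definition above) =====
theorem scoring_run_length_spec : Claim_equal_scoring_run_length := by
  intro xs _
  show scoring_run_length xs = scoring_run_length_alt xs
  exact main_eq xs
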